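-- pv_equiv track=rewrite | github.com/dpwdec/dpwdec.github.io | content_directory/directory_parser.py | join_with_acronyms
-- ===== SOURCE A (Python) =====
-- from typing import List
--
-- def join_with_acronyms(words: List[str]) -> str:
--     current_word, *tail = words
--     if len(tail) > 0:
--         next_word = tail[0]
--         insert = "" if len(current_word) == 1 and len(next_word) == 1 else " "
--         return current_word + insert + join_with_acronyms(tail)
--     else:
--         return current_word
-- ===== SOURCE B (Python) =====
-- from typing import List
--
-- def join_with_acronyms(words: List[str]) -> str:
--     prev, *rest = words
--     buf = [prev]
--     for w in rest:
--         buf.append("" if len(prev) == 1 and len(w) == 1 else " ")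
--         buf.append(w)
--         prev = w
--     return "".join(buf)
-- ===== Notes on version B (the rewrite author's own statement) =====
-- stated objective: faster
-- what changed: Replaced the quadratic string-concatenating recursion with a single iterative pass that accumulates the pieces in a list buffer and joins once at the end.
import Mathlib
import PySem

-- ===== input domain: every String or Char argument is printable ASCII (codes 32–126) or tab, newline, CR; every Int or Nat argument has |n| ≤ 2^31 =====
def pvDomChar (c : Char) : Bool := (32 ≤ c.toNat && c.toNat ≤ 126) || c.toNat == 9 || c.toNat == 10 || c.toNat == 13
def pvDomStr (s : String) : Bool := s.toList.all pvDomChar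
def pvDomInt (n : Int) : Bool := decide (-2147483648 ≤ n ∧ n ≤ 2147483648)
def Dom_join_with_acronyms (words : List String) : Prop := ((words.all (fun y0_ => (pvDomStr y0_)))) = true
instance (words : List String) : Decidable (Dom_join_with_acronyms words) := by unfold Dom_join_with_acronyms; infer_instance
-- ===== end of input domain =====

-- B replaces A's string-concatenating recursion by one iterative pass into a list buffer joined once at the end (idiomatic); both Pythons raise ValueError on [], excluded by Pre_.


-- ===== PORT A =====
-- A, on the PySem.Chars (List Char) representation of the words:
-- 'current_word, *tail = words'; if tail is nonempty, pick the separator from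
-- the two lengths and recurse on tail; '[]' is unreachable under Pre_
-- (Python raises ValueError at the unpack there).
def pvJoinA : List (List Char) → List Char
  | [] => []
  | current_word :: tail =>
    match tail with
    | next_word :: _ =>
      let insert : List Char :=
        if PySem.Chars.len current_word = 1 ∧ PySem.Chars.len next_word = 1 then [] else [' ']
      current_word ++ insert ++ pvJoinA tail
    | [] => current_word

def join_with_acronyms (words : List String) : String :=
  String.ofList (pvJoinA (words.map String.toList))

-- ===== PORT B =====
-- B: iterative pass; state = (list buffer, previous word); one final "".join.
-- '[]' is unreachable under Pre_ (Python raises ValueError at the unpack).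
def join_with_acronyms_alt (words : List String) : String :=
  match words.map String.toList with
  | [] => ""
  | prev :: rest =>
    let st := rest.foldl
      (fun (acc : List (List Char) × List Char) w =>
        (acc.1 ++ [(if PySem.Chars.len acc.2 = 1 ∧ PySem.Chars.len w = 1 then [] else [' ']), w], w))
      ([prev], prev)
    String.ofList (PySem.Chars.join [] st.1)

-- ===== PRECONDITION & SPEC =====
-- Pre_ excludes only the empty list, on which both Pythons raise ValueError.
def Pre_join_with_acronyms (words : List String) : Prop := words ≠ []
instance (words : List String) : Decidable (Pre_join_with_acronyms words) := by unfold Pre_join_with_acronyms; infer_instance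
def pvWitness_join_with_acronyms : List String := (["a", "b", "cat"])

def Spec_join_with_acronyms (words : List String) (out : String) : Prop := out = join_with_acronyms_alt words
instance (words : List String) (out : String) : Decidable (Spec_join_with_acronyms words out) := by unfold Spec_join_with_acronyms; infer_instance

-- ===== CLAIM (what is proved, stated in full; the proofs are below) =====
def Claim_equal_join_with_acronyms : Prop := ∀ (words : List String), Dom_join_with_acronyms words → Pre_join_with_acronyms words → Spec_join_with_acronyms words (join_with_acronyms words)

-- ===== LEMMAS AND PROOFS =====

-- abbreviation for B's folding step (proof-side only)
def pvStep : List (List Char) × List Char → List Char → List (List Char) × List Char :=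
  fun acc w => (acc.1 ++ [(if PySem.Chars.len acc.2 = 1 ∧ PySem.Chars.len w = 1 then [] else [' ']), w], w)

-- "".join is flatten
theorem pv_join0 : ∀ l : List (List Char), PySem.Chars.join [] l = l.flatten
  | [] => rfl
  | [x] => by simp [PySem.Chars.join, List.intercalate]
  | x :: y :: t => by
    have h : (List.intersperse ([] : List Char) (y :: t)).flatten = (y :: t).flatten :=
      pv_join0 (y :: t)
    show (x :: ([] : List Char) :: List.intersperse [] (y :: t)).flatten = x ++ (y :: t).flatten
    simp only [List.flatten_cons, List.nil_append, h]

-- the foldl flushes its buffer to the front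
theorem pv_fold_buf (rest : List (List Char)) (prev : List Char) (buf : List (List Char)) :
    ((rest.foldl pvStep (buf, prev)).1).flatten
    = buf.flatten ++ ((rest.foldl pvStep ([], prev)).1).flatten := by
  induction rest generalizing prev buf with
  | nil => simp
  | cons w ws ih =>
    rw [List.foldl_cons, List.foldl_cons]
    show ((ws.foldl pvStep (buf ++ [_, w], w)).1).flatten
      = buf.flatten ++ ((ws.foldl pvStep ([] ++ [_, w], w)).1).flatten
    rw [ih w (buf ++ _), ih w ([] ++ _)]
    simp [List.append_assoc]

-- A's recursion computes the flattened buffer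
theorem pv_A_eq (rest : List (List Char)) (prev : List Char) :
    pvJoinA (prev :: rest)
    = prev ++ ((rest.foldl pvStep ([], prev)).1).flatten := by
  induction rest generalizing prev with
  | nil => simp [pvJoinA]
  | cons w ws ih =>
    show prev ++ _ ++ pvJoinA (w :: ws) = _
    rw [ih w, List.foldl_cons]
    show _ = prev ++ ((ws.foldl pvStep ([] ++ [_, w], w)).1).flatten
    rw [pv_fold_buf ws w ([] ++ _)]
    simp [List.append_assoc]

-- ===== VERDICT (by name: the statement is the Claim_ definition above) =====
theorem join_with_acronyms_spec : Claim_equal_join_with_acronyms := by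
  intro words _ hpre
  unfold Spec_join_with_acronyms join_with_acronyms join_with_acronyms_alt
  match words with
  | [] => exact absurd rfl hpre
  | pw :: rws =>
    show String.ofList (pvJoinA (pw.toList :: rws.map String.toList))
      = String.ofList (PySem.Chars.join [] ((( rws.map String.toList).foldl pvStep ([pw.toList], pw.toList)).1))
    rw [pv_join0, pv_fold_buf _ _ [pw.toList], pv_A_eq]
    simp
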